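-- pv_equiv track=rewrite | github.com/sgleem/cyclegan-adaptation | tool/split_utt/prepare.py | extractSet
-- ===== SOURCE A (Python) =====
-- def extractSet(s2u, adapt_num, dev_num, test_num, start_idx=0):
--     """
--     for each txtList in spkId
--         0) check if split is valid, if not raise error
--         1) adapt_start ~ adapt_end: append utt to adapt set
--             adapt_start: (start_idx) % total_len
--             adapt_end: (start_idx+adapt_txt_num) % total_len
--         2) dev_start ~ dev_end: append utt to dev set
--             dev_start: (adapt_end) % total_len
--             dev_end: (adapt_end+dev_txt_num) % total_len
--         3) test_start ~ test_end: append utt to test set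
--             test_start: (dev_end) % total_len
--             test_end: (dev_end+test_txt_num) % total_len
--     """
--     total_num = adapt_num + dev_num + test_num
--     num = {"adapt" : adapt_num, "dev" : dev_num, "test" : test_num}
--     dataSet = {"adapt" : [], "dev" : [], "test": []}
--
--     for uttList in s2u.values():
--         # 1, 2, 3) Iterate Set
--         for setType in ["adapt", "dev", "test"]:
--             set_num = num[setType]
--             end_idx = (start_idx + set_num)
--             for cur_idx in range(start_idx, end_idx):
--                 cur_idx = cur_idx % total_num
--                 cur_uttId = uttList[cur_idx]
--                 dataSet[setType].append(cur_uttId)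
--             start_idx = end_idx
--
--     return dataSet
-- ===== SOURCE B (Python) =====
-- def extractSet(s2u, adapt_num, dev_num, test_num, start_idx=0):
--     # Key observation: A advances start_idx by total_num per speaker, which vanishes
--     # modulo total_num — so every speaker picks the SAME rotated index table.
--     # B therefore computes each set's index table once and applies it to all speakers.
--     if not s2u:
--         return {"adapt": [], "dev": [], "test": []}
--     total_num = adapt_num + dev_num + test_num
--
--     def pick(off, n):
--         idx = [j % total_num for j in range(off, off + n)]
--         return [utts[j] for utts in s2u.values() for j in idx]
--
--     return {"adapt": pick(start_idx, adapt_num),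
--             "dev": pick(start_idx + adapt_num, dev_num),
--             "test": pick(start_idx + adapt_num + dev_num, test_num)}
-- ===== Notes on version B (the rewrite author's own statement) =====
-- stated objective: simpler
-- what changed: B observes that A's per-speaker start advance (+= total_num) vanishes modulo total_num, so the rotated index table of each set is identical for every speaker: B precomputes each set's index table once and applies it to all speakers in one set-major flat comprehension, eliminating A's speaker-major loop with its stateful advancing start/end indices, count dict and dataSet dict.
import Mathlib
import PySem

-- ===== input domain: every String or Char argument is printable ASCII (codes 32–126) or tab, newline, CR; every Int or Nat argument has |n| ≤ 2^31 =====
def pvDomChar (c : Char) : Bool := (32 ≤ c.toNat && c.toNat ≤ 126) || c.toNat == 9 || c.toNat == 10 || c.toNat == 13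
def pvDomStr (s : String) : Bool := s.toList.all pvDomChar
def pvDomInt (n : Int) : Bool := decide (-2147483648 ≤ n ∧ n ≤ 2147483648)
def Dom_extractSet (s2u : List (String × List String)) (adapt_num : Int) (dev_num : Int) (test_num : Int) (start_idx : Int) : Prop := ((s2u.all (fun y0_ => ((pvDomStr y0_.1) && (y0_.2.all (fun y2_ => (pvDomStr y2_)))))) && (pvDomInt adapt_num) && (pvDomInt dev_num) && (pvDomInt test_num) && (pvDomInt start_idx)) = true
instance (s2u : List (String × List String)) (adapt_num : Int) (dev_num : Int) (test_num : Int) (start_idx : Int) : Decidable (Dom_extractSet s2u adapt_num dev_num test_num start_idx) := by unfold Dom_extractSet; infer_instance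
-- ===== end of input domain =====

-- B exploits that A's per-speaker start advance (+= total_num) vanishes modulo total_num:
-- each set's rotated index table is computed ONCE and applied to every speaker (set-major,
-- table-driven), replacing A's speaker-major stateful advancing-index loops (objective: simpler).


-- ===== PORT A =====
def extractSet (s2u : List (String × List String)) (adapt_num : Int) (dev_num : Int) (test_num : Int) (start_idx : Int) : List (String × List String) :=
  let total_num := adapt_num + dev_num + test_num
  let num : PySem.Dict String Int :=
    ((PySem.Dict.empty.insert "adapt" adapt_num).insert "dev" dev_num).insert "test" test_num
  let dataSet : PySem.Dict String (List String) :=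
    ((PySem.Dict.empty.insert "adapt" []).insert "dev" []).insert "test" []
  let res := s2u.foldl (fun (st : PySem.Dict String (List String) × Int) spk =>
    ["adapt", "dev", "test"].foldl (fun (st2 : PySem.Dict String (List String) × Int) setType =>
      let set_num := num.getD setType 0      -- num[setType]: the key is always present, so getD is exact
      let end_idx := st2.2 + set_num
      let ds := (PySem.List.pyRange st2.2 end_idx 1).foldl (fun ds cur_idx =>
        let cur_idx2 := PySem.Int.mod cur_idx total_num
        -- uttList[cur_idx]: IndexError (and % 0) lie outside Pre_, where pyGetD's default is never used
        let cur_uttId := PySem.List.pyGetD spk.2 cur_idx2 ""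
        ds.modify setType [] (fun l => l ++ [cur_uttId])) st2.1
      (ds, end_idx)) st) (dataSet, start_idx)
  res.1.items

-- ===== PORT B =====
def extractSet_alt (s2u : List (String × List String)) (adapt_num : Int) (dev_num : Int) (test_num : Int) (start_idx : Int) : List (String × List String) :=
  if s2u = [] then [("adapt", []), ("dev", []), ("test", [])]
  else
    let total_num := adapt_num + dev_num + test_num
    let pick : Int → Int → List String := fun off n =>
      let idx := (PySem.List.pyRange off (off + n) 1).map (fun j => PySem.Int.mod j total_num)
      -- utts[j]: IndexError lies outside Pre_, where pyGetD's default is never used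
      s2u.flatMap (fun utts => idx.map (fun j => PySem.List.pyGetD utts.2 j ""))
    [("adapt", pick start_idx adapt_num),
     ("dev", pick (start_idx + adapt_num) dev_num),
     ("test", pick (start_idx + adapt_num + dev_num) test_num)]

-- ===== PRECONDITION & SPEC =====
-- Pre_ keeps the inputs where A returns: an empty speaker dict, all-nonpositive counts (nothing is
-- taken), or a nonzero total with every speaker's list at least |total| long (shorter lists make A
-- raise IndexError, a zero total with a count to take raises ZeroDivisionError; for negative totals
-- this also drops a few shallow-wrap corners where A — and B alike — still returns).
def Pre_extractSet (s2u : List (String × List String)) (adapt_num : Int) (dev_num : Int) (test_num : Int) (start_idx : Int) : Prop :=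
  s2u = [] ∨ (adapt_num ≤ 0 ∧ dev_num ≤ 0 ∧ test_num ≤ 0) ∨
  (adapt_num + dev_num + test_num ≠ 0 ∧
    ∀ p ∈ s2u, (((adapt_num + dev_num + test_num).natAbs : Int)) ≤ p.2.length)
instance (s2u : List (String × List String)) (adapt_num : Int) (dev_num : Int) (test_num : Int) (start_idx : Int) : Decidable (Pre_extractSet s2u adapt_num dev_num test_num start_idx) := by unfold Pre_extractSet; infer_instance
def pvWitness_extractSet : (List (String × List String)) × Int × Int × Int × Int :=
  ([("sp1", ["u0", "u1", "u2"]), ("sp2", ["v0", "v1", "v2", "v3"])], 1, 1, 1, 1)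
def Spec_extractSet (s2u : List (String × List String)) (adapt_num : Int) (dev_num : Int) (test_num : Int) (start_idx : Int) (out : List (String × List String)) : Prop := out = extractSet_alt s2u adapt_num dev_num test_num start_idx
instance (s2u : List (String × List String)) (adapt_num : Int) (dev_num : Int) (test_num : Int) (start_idx : Int) (out : List (String × List String)) : Decidable (Spec_extractSet s2u adapt_num dev_num test_num start_idx out) := by unfold Spec_extractSet; infer_instance

-- ===== CLAIM (what is proved, stated in full; the proofs are below) =====
def Claim_equal_extractSet : Prop := ∀ (s2u : List (String × List String)) (adapt_num : Int) (dev_num : Int) (test_num : Int) (start_idx : Int), Dom_extractSet s2u adapt_num dev_num test_num start_idx → Pre_extractSet s2u adapt_num dev_num test_num start_idx → Spec_extractSet s2u adapt_num dev_num test_num start_idx (extractSet s2u adapt_num dev_num test_num start_idx)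

-- ===== LEMMAS AND PROOFS =====

-- modify on the literal three-key dict rewrites the matching component
theorem pvModA (A D T : List String) (f : List String → List String) :
    (PySem.Dict.mk [("adapt", A), ("dev", D), ("test", T)]).modify "adapt" [] f
    = PySem.Dict.mk [("adapt", f A), ("dev", D), ("test", T)] := by
  simp [PySem.Dict.modify, PySem.Dict.insert, PySem.Dict.contains, PySem.Dict.getD, PySem.Dict.get?]

theorem pvModD (A D T : List String) (f : List String → List String) :
    (PySem.Dict.mk [("adapt", A), ("dev", D), ("test", T)]).modify "dev" [] f
    = PySem.Dict.mk [("adapt", A), ("dev", f D), ("test", T)] := by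
  simp [PySem.Dict.modify, PySem.Dict.insert, PySem.Dict.contains, PySem.Dict.getD, PySem.Dict.get?]

theorem pvModT (A D T : List String) (f : List String → List String) :
    (PySem.Dict.mk [("adapt", A), ("dev", D), ("test", T)]).modify "test" [] f
    = PySem.Dict.mk [("adapt", A), ("dev", D), ("test", f T)] := by
  simp [PySem.Dict.modify, PySem.Dict.insert, PySem.Dict.contains, PySem.Dict.getD, PySem.Dict.get?]

-- A's innermost append loop on each fixed key, as one map
theorem pvFoldA (l : List Int) (g : Int → String) (A D T : List String) :
    l.foldl (fun ds c => PySem.Dict.modify ds "adapt" [] (fun x => x ++ [g c]))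
      (PySem.Dict.mk [("adapt", A), ("dev", D), ("test", T)])
    = PySem.Dict.mk [("adapt", A ++ l.map g), ("dev", D), ("test", T)] := by
  induction l generalizing A with
  | nil => simp
  | cons c l ih => simp [List.foldl, pvModA, ih]

theorem pvFoldD (l : List Int) (g : Int → String) (A D T : List String) :
    l.foldl (fun ds c => PySem.Dict.modify ds "dev" [] (fun x => x ++ [g c]))
      (PySem.Dict.mk [("adapt", A), ("dev", D), ("test", T)])
    = PySem.Dict.mk [("adapt", A), ("dev", D ++ l.map g), ("test", T)] := by
  induction l generalizing D with
  | nil => simp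
  | cons c l ih => simp [List.foldl, pvModD, ih]

theorem pvFoldT (l : List Int) (g : Int → String) (A D T : List String) :
    l.foldl (fun ds c => PySem.Dict.modify ds "test" [] (fun x => x ++ [g c]))
      (PySem.Dict.mk [("adapt", A), ("dev", D), ("test", T)])
    = PySem.Dict.mk [("adapt", A), ("dev", D), ("test", T ++ l.map g)] := by
  induction l generalizing T with
  | nil => simp
  | cons c l ih => simp [List.foldl, pvModT, ih]

-- range shifted by a constant
theorem pvRangeShift (s a b : Int) :
    PySem.List.pyRange (s + a) (s + b) 1 = (PySem.List.pyRange a b 1).map (fun i => s + i) := by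
  rw [PySem.List.pyRange_one, PySem.List.pyRange_one]
  have h : s + b - (s + a) = b - a := by ring
  rw [h, List.map_map]
  exact List.map_congr_left (fun k _ => by simp [Function.comp]; ring)

-- an empty range for a nonpositive count
theorem pvRangeNonpos (a : Int) (h : a ≤ 0) : PySem.List.pyRange 0 a 1 = [] := by
  rw [PySem.List.pyRange_one]
  simp
  omega

-- Python's % is invariant under adding the modulus
theorem pvModPeriod (x m : Int) (hm : m ≠ 0) : PySem.Int.mod (x + m) m = PySem.Int.mod x m := by
  have key : ∀ y n : Int, (y + n * 1) % n = y % n := fun y n => Int.add_mul_emod_self_left y n 1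
  rcases lt_or_gt_of_ne hm with hneg | hpos
  · have h1 : PySem.Int.mod (x + m) m = -(PySem.Int.mod (-(x+m)) (-m)) := by
      rw [← PySem.Int.mod_neg_neg]; simp
    have h2 : PySem.Int.mod x m = -(PySem.Int.mod (-x) (-m)) := by
      rw [← PySem.Int.mod_neg_neg]; simp
    rw [h1, h2, PySem.Int.mod_eq_emod_of_pos (by omega), PySem.Int.mod_eq_emod_of_pos (by omega)]
    have h3 : -(x+m) = -x + (-m) * 1 := by ring
    rw [h3, key]
  · rw [PySem.Int.mod_eq_emod_of_pos hpos, PySem.Int.mod_eq_emod_of_pos hpos,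
      (by ring : x + m = x + m * 1), key]

-- one speaker: A's advancing-index loop over range(start, end) equals per-speaker maps
theorem pvSpeaker (a d t : Int) (utt : List String) (A D T : List String) (s : Int) :
    ["adapt", "dev", "test"].foldl (fun (st2 : PySem.Dict String (List String) × Int) setType =>
      (((PySem.List.pyRange st2.2 (st2.2 + ((((PySem.Dict.empty.insert "adapt" a).insert "dev" d).insert "test" t)).getD setType 0) 1).foldl (fun ds cur_idx =>
        ds.modify setType [] (fun l => l ++ [PySem.List.pyGetD utt (PySem.Int.mod cur_idx (a + d + t)) ""])) st2.1),
       st2.2 + ((((PySem.Dict.empty.insert "adapt" a).insert "dev" d).insert "test" t)).getD setType 0))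
      (PySem.Dict.mk [("adapt", A), ("dev", D), ("test", T)], s)
    = (PySem.Dict.mk [
        ("adapt", A ++ (PySem.List.pyRange 0 a 1).map (fun i => PySem.List.pyGetD utt (PySem.Int.mod (s + i) (a + d + t)) "")),
        ("dev", D ++ (PySem.List.pyRange 0 d 1).map (fun i => PySem.List.pyGetD utt (PySem.Int.mod (s + a + i) (a + d + t)) "")),
        ("test", T ++ (PySem.List.pyRange 0 t 1).map (fun i => PySem.List.pyGetD utt (PySem.Int.mod (s + a + d + i) (a + d + t)) ""))],
       s + (a + d + t)) := by
  have hA : (((((PySem.Dict.empty.insert "adapt" a).insert "dev" d).insert "test" t)) : PySem.Dict String Int).getD "adapt" 0 = a := by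
    simp [PySem.Dict.getD_insert]
  have hD : (((((PySem.Dict.empty.insert "adapt" a).insert "dev" d).insert "test" t)) : PySem.Dict String Int).getD "dev" 0 = d := by
    simp [PySem.Dict.getD_insert]
  have hT : (((((PySem.Dict.empty.insert "adapt" a).insert "dev" d).insert "test" t)) : PySem.Dict String Int).getD "test" 0 = t := by
    simp
  simp only [List.foldl_cons, List.foldl_nil, hA, hD, hT]
  rw [pvFoldA _ (fun c => PySem.List.pyGetD utt (PySem.Int.mod c (a + d + t)) "") A D T,
    pvFoldD _ (fun c => PySem.List.pyGetD utt (PySem.Int.mod c (a + d + t)) "") _ D T,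
    pvFoldT _ (fun c => PySem.List.pyGetD utt (PySem.Int.mod c (a + d + t)) "") _ _ T]
  have h1 : PySem.List.pyRange s (s + a) 1 = (PySem.List.pyRange 0 a 1).map (fun i => s + i) := by
    simpa using pvRangeShift s 0 a
  have h2 : PySem.List.pyRange (s + a) (s + a + d) 1
      = (PySem.List.pyRange 0 d 1).map (fun i => s + a + i) := by
    simpa using pvRangeShift (s + a) 0 d
  have h3 : PySem.List.pyRange (s + a + d) (s + a + d + t) 1
      = (PySem.List.pyRange 0 t 1).map (fun i => s + a + d + i) := by
    simpa using pvRangeShift (s + a + d) 0 t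
  rw [h1, h2, h3, List.map_map, List.map_map, List.map_map]
  refine congrArg₂ Prod.mk rfl (by ring)

-- the whole run of A's loop, as a fold over triples of lists with an advancing offset
theorem pvOuter (a d t : Int)
    (s2u : List (String × List String)) (A D T : List String) (s : Int) :
    s2u.foldl (fun (st : PySem.Dict String (List String) × Int) spk =>
      ["adapt", "dev", "test"].foldl (fun (st2 : PySem.Dict String (List String) × Int) setType =>
        (((PySem.List.pyRange st2.2 (st2.2 + ((((PySem.Dict.empty.insert "adapt" a).insert "dev" d).insert "test" t)).getD setType 0) 1).foldl (fun ds cur_idx =>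
          ds.modify setType [] (fun l => l ++ [PySem.List.pyGetD spk.2 (PySem.Int.mod cur_idx (a + d + t)) ""])) st2.1),
         st2.2 + ((((PySem.Dict.empty.insert "adapt" a).insert "dev" d).insert "test" t)).getD setType 0)) st)
      (PySem.Dict.mk [("adapt", A), ("dev", D), ("test", T)], s)
    = ((fun r => (PySem.Dict.mk [("adapt", r.1), ("dev", r.2.1), ("test", r.2.2.1)], r.2.2.2))
        (s2u.foldl (fun (st : List String × List String × List String × Int) spk =>
          (st.1 ++ (PySem.List.pyRange 0 a 1).map (fun i => PySem.List.pyGetD spk.2 (PySem.Int.mod (st.2.2.2 + i) (a + d + t)) ""),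
           st.2.1 ++ (PySem.List.pyRange 0 d 1).map (fun i => PySem.List.pyGetD spk.2 (PySem.Int.mod (st.2.2.2 + a + i) (a + d + t)) ""),
           st.2.2.1 ++ (PySem.List.pyRange 0 t 1).map (fun i => PySem.List.pyGetD spk.2 (PySem.Int.mod (st.2.2.2 + a + d + i) (a + d + t)) ""),
           st.2.2.2 + (a + d + t))) (A, D, T, s))) := by
  induction s2u generalizing A D T s with
  | nil => rfl
  | cons spk tl ih =>
    refine Eq.trans (congrArg (fun z => List.foldl _ z tl) (pvSpeaker a d t spk.2 A D T s)) ?_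
    exact ih _ _ _ _

-- with a nonzero total, the advancing offset is invisible mod total: the fold flattens to
-- flatMaps with ONE fixed offset per set — exactly B's precomputed index tables
theorem pvFoldFix (a d t : Int) (ht : a + d + t ≠ 0)
    (l : List (String × List String)) (A D T : List String) (s : Int) :
    l.foldl (fun (st : List String × List String × List String × Int) spk =>
      (st.1 ++ (PySem.List.pyRange 0 a 1).map (fun i => PySem.List.pyGetD spk.2 (PySem.Int.mod (st.2.2.2 + i) (a + d + t)) ""),
       st.2.1 ++ (PySem.List.pyRange 0 d 1).map (fun i => PySem.List.pyGetD spk.2 (PySem.Int.mod (st.2.2.2 + a + i) (a + d + t)) ""),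
       st.2.2.1 ++ (PySem.List.pyRange 0 t 1).map (fun i => PySem.List.pyGetD spk.2 (PySem.Int.mod (st.2.2.2 + a + d + i) (a + d + t)) ""),
       st.2.2.2 + (a + d + t))) (A, D, T, s)
    = (A ++ l.flatMap (fun spk => (PySem.List.pyRange 0 a 1).map (fun i => PySem.List.pyGetD spk.2 (PySem.Int.mod (s + i) (a + d + t)) "")),
       D ++ l.flatMap (fun spk => (PySem.List.pyRange 0 d 1).map (fun i => PySem.List.pyGetD spk.2 (PySem.Int.mod (s + a + i) (a + d + t)) "")),
       T ++ l.flatMap (fun spk => (PySem.List.pyRange 0 t 1).map (fun i => PySem.List.pyGetD spk.2 (PySem.Int.mod (s + a + d + i) (a + d + t)) "")),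
       s + l.length * (a + d + t)) := by
  induction l generalizing A D T s with
  | nil => simp
  | cons spk tl ih =>
    simp only [List.foldl_cons]
    rw [ih]
    have e1 : (fun (q : String × List String) => (PySem.List.pyRange 0 a 1).map (fun i => PySem.List.pyGetD q.2 (PySem.Int.mod (s + (a + d + t) + i) (a + d + t)) ""))
        = (fun q => (PySem.List.pyRange 0 a 1).map (fun i => PySem.List.pyGetD q.2 (PySem.Int.mod (s + i) (a + d + t)) "")) := by
      funext q
      exact List.map_congr_left (fun i _ => by
        rw [(by ring : s + (a + d + t) + i = s + i + (a + d + t)), pvModPeriod _ _ ht])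
    have e2 : (fun (q : String × List String) => (PySem.List.pyRange 0 d 1).map (fun i => PySem.List.pyGetD q.2 (PySem.Int.mod (s + (a + d + t) + a + i) (a + d + t)) ""))
        = (fun q => (PySem.List.pyRange 0 d 1).map (fun i => PySem.List.pyGetD q.2 (PySem.Int.mod (s + a + i) (a + d + t)) "")) := by
      funext q
      exact List.map_congr_left (fun i _ => by
        rw [(by ring : s + (a + d + t) + a + i = s + a + i + (a + d + t)), pvModPeriod _ _ ht])
    have e3 : (fun (q : String × List String) => (PySem.List.pyRange 0 t 1).map (fun i => PySem.List.pyGetD q.2 (PySem.Int.mod (s + (a + d + t) + a + d + i) (a + d + t)) ""))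
        = (fun q => (PySem.List.pyRange 0 t 1).map (fun i => PySem.List.pyGetD q.2 (PySem.Int.mod (s + a + d + i) (a + d + t)) "")) := by
      funext q
      exact List.map_congr_left (fun i _ => by
        rw [(by ring : s + (a + d + t) + a + d + i = s + a + d + i + (a + d + t)), pvModPeriod _ _ ht])
    rw [e1, e2, e3]
    simp only [List.flatMap_cons, List.length_cons, List.append_assoc]
    refine congrArg₂ Prod.mk rfl (congrArg₂ Prod.mk rfl (congrArg₂ Prod.mk rfl ?_))
    push_cast
    ring

-- with all counts nonpositive nothing is appended: the fold leaves the three lists unchanged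
theorem pvFoldEmpty (a d t : Int) (ha : a ≤ 0) (hd : d ≤ 0) (htt : t ≤ 0)
    (l : List (String × List String)) (A D T : List String) (s : Int) :
    (l.foldl (fun (st : List String × List String × List String × Int) spk =>
      (st.1 ++ (PySem.List.pyRange 0 a 1).map (fun i => PySem.List.pyGetD spk.2 (PySem.Int.mod (st.2.2.2 + i) (a + d + t)) ""),
       st.2.1 ++ (PySem.List.pyRange 0 d 1).map (fun i => PySem.List.pyGetD spk.2 (PySem.Int.mod (st.2.2.2 + a + i) (a + d + t)) ""),
       st.2.2.1 ++ (PySem.List.pyRange 0 t 1).map (fun i => PySem.List.pyGetD spk.2 (PySem.Int.mod (st.2.2.2 + a + d + i) (a + d + t)) ""),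
       st.2.2.2 + (a + d + t))) (A, D, T, s))
    = (A, D, T, s + l.length * (a + d + t)) := by
  induction l generalizing s with
  | nil => simp
  | cons spk tl ih =>
    simp only [pvRangeNonpos a ha, pvRangeNonpos d hd, pvRangeNonpos t htt,
      List.map_nil, List.append_nil] at ih ⊢
    simp only [List.foldl_cons]
    rw [ih]
    refine congrArg₂ Prod.mk rfl (congrArg₂ Prod.mk rfl (congrArg₂ Prod.mk rfl ?_))
    simp only [List.length_cons]
    push_cast
    ring

-- B's pick, rebased to offset-0 ranges
theorem pvPick (l : List (String × List String)) (m off n : Int) :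
    l.flatMap (fun utts => ((PySem.List.pyRange off (off + n) 1).map (fun j => PySem.Int.mod j m)).map
        (fun j => PySem.List.pyGetD utts.2 j ""))
    = l.flatMap (fun utts => (PySem.List.pyRange 0 n 1).map
        (fun i => PySem.List.pyGetD utts.2 (PySem.Int.mod (off + i) m) "")) := by
  refine congrArg (fun f => List.flatMap f l) (funext fun utts => ?_)
  rw [(by simpa using pvRangeShift off 0 n : PySem.List.pyRange off (off + n) 1
        = (PySem.List.pyRange 0 n 1).map (fun i => off + i)),
    List.map_map, List.map_map]
  rfl

-- ===== VERDICT (by name: the statement is the Claim_ definition above) =====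
theorem extractSet_spec : Claim_equal_extractSet := by
  intro s2u a d t s hdom hpre
  show extractSet s2u a d t s = extractSet_alt s2u a d t s
  by_cases hs : s2u = []
  · subst hs; rfl
  · simp only [extractSet, extractSet_alt, if_neg hs]
    have hds : ((PySem.Dict.empty.insert "adapt" ([] : List String)).insert "dev" []).insert "test" []
        = PySem.Dict.mk [("adapt", []), ("dev", []), ("test", [])] := rfl
    rw [hds, pvOuter a d t s2u [] [] [] s]
    rw [pvPick s2u (a + d + t) s a, pvPick s2u (a + d + t) (s + a) d,
      pvPick s2u (a + d + t) (s + a + d) t]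
    rcases hpre with h | ⟨ha, hd, ht⟩ | ⟨htot, _⟩
    · exact absurd h hs
    · rw [pvFoldEmpty a d t ha hd ht s2u [] [] [] s]
      simp [pvRangeNonpos a ha, pvRangeNonpos d hd, pvRangeNonpos t ht]
    · rw [pvFoldFix a d t htot s2u [] [] [] s]
      simp
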